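-- pv_equiv track=rewrite | github.com/shreyaspadhye3011/leetcode | scu-daa-coen279/HW5.1 - greedy-schedule-2.py | greedy_schedule_2
-- ===== SOURCE A (Python) =====
-- def greedy_schedule_2(A):
--     A.sort()
--     # pre: A[start:stop:step] - used for list slicing. Start at 'start', go till 'stop' with step size = 'step'
--     # keep all elements at even positions of the list in `schedule_1`
--     schedule_1 = A[0::2]
--
--     # keep all elements at odd positions of the list in `schedule_2`
--     schedule_2 = A[1::2]
--
--     # compute wait lists for both schedules
--     wait_list_1 = []
--     wait_list_2 = []
--     wait = 0
--     for i in range(1, len(schedule_1)):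
--         wait += schedule_1[i-1]
--         wait_list_1.append(wait)
--
--     wait = 0
--     for i in range(1, len(schedule_2)):
--         wait += schedule_2[i-1]
--         wait_list_2.append(wait)
--
--     # TODO: figure out if the sum can be done in the loop itself
--     # TODO: see if you can improvr the code by adding map or other list methods / manipulations
--     return sum(wait_list_1) + sum(wait_list_2)
-- ===== SOURCE B (Python) =====
-- def greedy_schedule_2(A):
--     # Single pass, rank-weighted sum: each element at sorted index i contributes
--     # (slots after it in its alternating schedule) * value; no intermediate lists.
--     # Like the original, sorts A in place.
--     A.sort()
--     n = len(A)
--     m1 = (n + 1) // 2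
--     m2 = n // 2
--     total = 0
--     for i, x in enumerate(A):
--         if i % 2 == 0:
--             total += (m1 - 1 - i // 2) * x
--         else:
--             total += (m2 - 1 - i // 2) * x
--     return total
-- ===== Notes on version B (the rewrite author's own statement) =====
-- stated objective: simpler
-- what changed: Replaced the two slice lists plus two prefix-sum wait-list loops and their final sums by one enumerate pass over the sorted list that adds a rank weight (slots-after-it-in-its-schedule) times each element, building no intermediate lists.
import Mathlib
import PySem

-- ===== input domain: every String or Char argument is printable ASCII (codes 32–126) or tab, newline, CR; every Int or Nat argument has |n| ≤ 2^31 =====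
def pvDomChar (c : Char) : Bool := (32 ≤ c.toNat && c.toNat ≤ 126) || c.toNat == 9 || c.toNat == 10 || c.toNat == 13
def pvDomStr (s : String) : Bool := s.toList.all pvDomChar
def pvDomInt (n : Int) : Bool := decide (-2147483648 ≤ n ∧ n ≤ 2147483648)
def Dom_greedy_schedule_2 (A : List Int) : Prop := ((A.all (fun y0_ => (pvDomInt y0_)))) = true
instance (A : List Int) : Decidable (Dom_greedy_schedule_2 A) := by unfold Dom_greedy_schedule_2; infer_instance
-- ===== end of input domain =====

-- B replaces A's two slice lists and two prefix-sum wait-list loops by one rank-weighted pass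
-- over the sorted list (objective: simpler — no intermediate lists; same asymptotic cost).
-- Both Pythons sort A in place; the equivalence proved here is about the return value.

-- ===== PORT A =====
-- A[0::2]: elements at even positions; hand-ported (PySem has no step-2 slice lemmas) — exact
-- for a step-2 slice starting at 0.  A[1::2] is then pvEvens of the tail.
def pvEvens : List Int → List Int
  | [] => []
  | [x] => [x]
  | x :: _ :: t => x :: pvEvens t

def greedy_schedule_2 (A : List Int) : Int :=
  let As := PySem.List.sorted A (fun x => x) false
  let schedule_1 := pvEvens As
  let schedule_2 := pvEvens As.tail
  -- for i in range(1, len(schedule_1)): wait += schedule_1[i-1]; wait_list_1.append(wait)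
  let st1 := (PySem.List.pyRange 1 (schedule_1.length : Int) 1).foldl
      (fun (st : Int × List Int) i =>
        let w := st.1 + PySem.List.pyGetD schedule_1 (i - 1) 0
        (w, st.2 ++ [w])) (0, [])
  let st2 := (PySem.List.pyRange 1 (schedule_2.length : Int) 1).foldl
      (fun (st : Int × List Int) i =>
        let w := st.1 + PySem.List.pyGetD schedule_2 (i - 1) 0
        (w, st.2 ++ [w])) (0, [])
  st1.2.sum + st2.2.sum

-- ===== PORT B =====
def greedy_schedule_2_alt (A : List Int) : Int :=
  let s := PySem.List.sorted A (fun x => x) false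
  let n : Int := s.length
  let m1 := PySem.Int.floordiv (n + 1) 2
  let m2 := PySem.Int.floordiv n 2
  (PySem.List.enumerate s 0).foldl
    (fun total p =>
      if PySem.Int.mod p.1 2 = 0 then
        total + (m1 - 1 - PySem.Int.floordiv p.1 2) * p.2
      else
        total + (m2 - 1 - PySem.Int.floordiv p.1 2) * p.2) 0

-- ===== PRECONDITION & SPEC =====
def Spec_greedy_schedule_2 (A : List Int) (out : Int) : Prop := out = greedy_schedule_2_alt A
instance (A : List Int) (out : Int) : Decidable (Spec_greedy_schedule_2 A out) := by unfold Spec_greedy_schedule_2; infer_instance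

-- ===== CLAIM (what is proved, stated in full; the proofs are below) =====
def Claim_equal_greedy_schedule_2 : Prop := ∀ (A : List Int), Dom_greedy_schedule_2 A → Spec_greedy_schedule_2 A (greedy_schedule_2 A)

-- ===== LEMMAS AND PROOFS =====

-- weight form of the sum of cumulative waits of one schedule s: Σⱼ (|s|-1-j)·s[j]
def pvW : List Int → Int
  | [] => 0
  | x :: r => (r.length : Int) * x + pvW r

-- sum of the prefix sums (s.take 1).sum + … + (s.take m).sum
def pvPS (s : List Int) : Nat → Int
  | 0 => 0
  | m + 1 => pvPS s m + (s.take (m + 1)).sum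

theorem pvW_append (s : List Int) (a : Int) : pvW (s ++ [a]) = pvW s + s.sum := by
  induction s with
  | nil => simp [pvW]
  | cons x r ih => simp [pvW, ih]; ring

theorem pvPS_append (s : List Int) (a : Int) : ∀ m, m ≤ s.length → pvPS (s ++ [a]) m = pvPS s m := by
  intro m hm
  induction m with
  | zero => rfl
  | succ k ih =>
      simp only [pvPS, ih (by omega), List.take_append_of_le_length (by omega : k + 1 ≤ s.length)]

theorem pvPS_eq_pvW (s : List Int) : pvPS s (s.length - 1) = pvW s := by
  induction s using List.reverseRecOn with
  | nil => rfl
  | append_singleton s a ih =>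
      cases s with
      | nil => simp [pvPS, pvW]
      | cons x r =>
          have hlen : ((x :: r) ++ [a]).length - 1 = r.length + 1 := by simp
          rw [hlen, pvPS, pvPS_append _ _ _ (by simp), pvW_append]
          have : (x :: r).length - 1 = r.length := by simp
          rw [this] at ih
          rw [ih]
          congr 1
          rw [List.take_append_of_le_length (by simp)]
          simp

-- invariant of A's wait-list loop, stated over List.range
theorem pvLoopA_inv (s : List Int) : ∀ m, m ≤ s.length →
    ((List.range m).foldl
      (fun (st : Int × List Int) k =>
        let w := st.1 + s.getD k 0
        (w, st.2 ++ [w])) (0, [])) =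
    ((s.take m).sum, ((List.range m).map (fun k => (s.take (k + 1)).sum))) := by
  intro m hm
  induction m with
  | zero => rfl
  | succ k ih =>
      rw [List.range_succ, List.foldl_append, List.map_append, ih (by omega)]
      have hk : k < s.length := by omega
      simp only [List.foldl_cons, List.foldl_nil, List.map_cons, List.map_nil]
      rw [List.getD_eq_getElem _ _ hk, List.sum_take_succ _ _ hk]

theorem pvSum_map_take (s : List Int) (m : Nat) :
    (((List.range m).map (fun k => (s.take (k + 1)).sum)).sum) = pvPS s m := by
  induction m with
  | zero => rfl
  | succ k ih => rw [List.range_succ, List.map_append, List.sum_append, pvPS, ih]; simp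

-- A's loop over pyRange 1 (len s) computes pvW s
theorem pvLoopA (s : List Int) :
    (((PySem.List.pyRange 1 (s.length : Int) 1).foldl
      (fun (st : Int × List Int) i =>
        let w := st.1 + PySem.List.pyGetD s (i - 1) 0
        (w, st.2 ++ [w])) (0, [])).2).sum = pvW s := by
  rw [PySem.List.pyRange_one, List.foldl_map]
  have h1 : (List.range ((s.length : Int) - 1).toNat).foldl
      (fun (st : Int × List Int) (k : Nat) =>
        let w := st.1 + PySem.List.pyGetD s (1 + (k : Int) - 1) 0
        (w, st.2 ++ [w])) (0, []) =
      (List.range ((s.length : Int) - 1).toNat).foldl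
      (fun (st : Int × List Int) (k : Nat) =>
        let w := st.1 + s.getD k 0
        (w, st.2 ++ [w])) (0, []) := by
    apply PySem.List.foldl_congr_mem
    intro st k hk
    simp only [add_sub_cancel_left]
    rw [PySem.List.pyGetD_natCast]
  rw [h1]
  have hle : ((s.length : Int) - 1).toNat ≤ s.length := by omega
  rw [pvLoopA_inv s _ hle]
  dsimp only
  rw [pvSum_map_take]
  have h2 : ((s.length : Int) - 1).toNat = s.length - 1 := by omega
  rw [h2, pvPS_eq_pvW]

-- lengths of the two alternating schedules
theorem pvEvens_length : ∀ t : List Int, (pvEvens t).length = (t.length + 1) / 2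
  | [] => rfl
  | [x] => by simp [pvEvens]
  | _ :: _ :: t => by
      simp only [pvEvens, List.length_cons]
      rw [pvEvens_length t]
      omega

-- one-step unfolding of pvEvens
theorem pvEvens_cons (x : Int) (L : List Int) : pvEvens (x :: L) = x :: pvEvens L.tail := by
  cases L <;> rfl

-- B's fold equals the sum of a weighted map
theorem pvFoldB (m1 m2 : Int) (l : List (Int × Int)) (t0 : Int) :
    l.foldl
      (fun total p =>
        if PySem.Int.mod p.1 2 = 0 then
          total + (m1 - 1 - PySem.Int.floordiv p.1 2) * p.2
        else
          total + (m2 - 1 - PySem.Int.floordiv p.1 2) * p.2) t0 =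
    t0 + (l.map (fun p =>
      (if PySem.Int.mod p.1 2 = 0 then m1 - 1 - PySem.Int.floordiv p.1 2
       else m2 - 1 - PySem.Int.floordiv p.1 2) * p.2)).sum := by
  induction l generalizing t0 with
  | nil => simp
  | cons p l ih =>
      simp only [List.foldl_cons, List.map_cons, List.sum_cons, ih]
      split_ifs <;> ring

-- shifting the enumerate start by 2 lowers both schedule counters by 1
theorem pvShift (m1 m2 : Int) : ∀ (t : List Int) (i0 : Int), 0 ≤ i0 →
    ((PySem.List.enumerate t (i0 + 2)).map (fun p =>
      (if PySem.Int.mod p.1 2 = 0 then m1 - 1 - PySem.Int.floordiv p.1 2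
       else m2 - 1 - PySem.Int.floordiv p.1 2) * p.2)).sum =
    ((PySem.List.enumerate t i0).map (fun p =>
      (if PySem.Int.mod p.1 2 = 0 then (m1 - 1) - 1 - PySem.Int.floordiv p.1 2
       else (m2 - 1) - 1 - PySem.Int.floordiv p.1 2) * p.2)).sum := by
  intro t
  induction t with
  | nil => intro i0 _; simp [PySem.List.enumerate_nil]
  | cons x t ih =>
      intro i0 h0
      rw [PySem.List.enumerate_cons, PySem.List.enumerate_cons]
      simp only [List.map_cons, List.sum_cons]
      have hstep : i0 + 2 + 1 = (i0 + 1) + 2 := by ring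
      rw [hstep, ih (i0 + 1) (by omega)]
      congr 1
      have hm : PySem.Int.mod (i0 + 2) 2 = PySem.Int.mod i0 2 := by
        rw [PySem.Int.mod_eq_emod_of_pos (by norm_num : (0:Int) < 2),
          PySem.Int.mod_eq_emod_of_pos (by norm_num : (0:Int) < 2)]
        omega
      have hd : PySem.Int.floordiv (i0 + 2) 2 = PySem.Int.floordiv i0 2 + 1 := by
        rw [PySem.Int.floordiv_eq_ediv_of_pos (by norm_num : (0:Int) < 2),
          PySem.Int.floordiv_eq_ediv_of_pos (by norm_num : (0:Int) < 2)]
        omega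
      rw [hm, hd]
      split_ifs <;> ring

-- the weighted sum over a list with B's counters, as one definition for the induction
def pvBsum (s : List Int) : Int :=
  ((PySem.List.enumerate s 0).map (fun p =>
    (if PySem.Int.mod p.1 2 = 0 then
        PySem.Int.floordiv ((s.length : Int) + 1) 2 - 1 - PySem.Int.floordiv p.1 2
      else
        PySem.Int.floordiv (s.length : Int) 2 - 1 - PySem.Int.floordiv p.1 2) * p.2)).sum

-- the heart: wait sums of the two alternating schedules = B's single weighted pass
theorem pvKey : ∀ (L : List Int), pvW (pvEvens L) + pvW (pvEvens L.tail) = pvBsum L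
  | [] => rfl
  | [x] => by
      simp only [pvBsum, pvEvens, pvW, List.tail]
      norm_num [PySem.List.enumerate_cons, PySem.List.enumerate_nil, PySem.Int.mod, PySem.Int.floordiv]
  | x :: y :: t => by
      have ih := pvKey t
      unfold pvBsum at ih
      have hc : pvEvens (y :: t) = y :: pvEvens t.tail := pvEvens_cons y t
      simp only [pvEvens, List.tail_cons, hc, pvW]
      unfold pvBsum
      rw [PySem.List.enumerate_cons, PySem.List.enumerate_cons]
      simp only [List.map_cons, List.sum_cons]
      have h02 : (0 : Int) + 1 + 1 = 0 + 2 := by norm_num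
      rw [h02, pvShift _ _ t 0 le_rfl]
      have hm1 : PySem.Int.floordiv (((x :: y :: t).length : Int) + 1) 2 - 1 =
          PySem.Int.floordiv ((t.length : Int) + 1) 2 := by
        rw [PySem.Int.floordiv_eq_ediv_of_pos (by norm_num : (0:Int) < 2),
          PySem.Int.floordiv_eq_ediv_of_pos (by norm_num : (0:Int) < 2)]
        simp only [List.length_cons]
        push_cast
        omega
      have hm2 : PySem.Int.floordiv ((x :: y :: t).length : Int) 2 - 1 =
          PySem.Int.floordiv (t.length : Int) 2 := by
        rw [PySem.Int.floordiv_eq_ediv_of_pos (by norm_num : (0:Int) < 2),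
          PySem.Int.floordiv_eq_ediv_of_pos (by norm_num : (0:Int) < 2)]
        simp only [List.length_cons]
        push_cast
        omega
      rw [hm1, hm2, ← ih]
      have hmod0 : PySem.Int.mod (0 : Int) 2 = 0 := by decide
      have hmod1 : PySem.Int.mod (0 + 1 : Int) 2 = 1 := by decide
      have hdiv0 : PySem.Int.floordiv (0 : Int) 2 = 0 := by decide
      have hdiv1 : PySem.Int.floordiv (0 + 1 : Int) 2 = 0 := by decide
      rw [hmod0, hmod1, hdiv0, hdiv1]
      norm_num
      have he : ((pvEvens t).length : Int) = PySem.Int.floordiv ((t.length : Int) + 1) 2 := by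
        rw [PySem.Int.floordiv_eq_ediv_of_pos (by norm_num : (0:Int) < 2), pvEvens_length t]
        push_cast
        omega
      have ho : ((pvEvens t.tail).length : Int) = PySem.Int.floordiv ((t.length : Int)) 2 := by
        rw [PySem.Int.floordiv_eq_ediv_of_pos (by norm_num : (0:Int) < 2)]
        cases t with
        | nil => decide
        | cons a r =>
            simp only [List.tail_cons, pvEvens_length r, List.length_cons]
            push_cast
            omega
      rw [he, ho]
      simp only [PySem.Int.floordiv_eq_ediv_of_pos (show (0:Int) < 2 by norm_num)]
      ring

-- ===== VERDICT (by name: the statement is the Claim_ definition above) =====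
theorem greedy_schedule_2_spec : Claim_equal_greedy_schedule_2 := by
  intro A _
  unfold Spec_greedy_schedule_2 greedy_schedule_2 greedy_schedule_2_alt
  simp only []
  rw [pvLoopA, pvLoopA, pvFoldB]
  rw [zero_add]
  exact pvKey (PySem.List.sorted A (fun x => x) false)
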